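-- pv_equiv track=rewrite | github.com/kamilGie/ASRT-WDI | Zestaw_1:_Proste_programy_z_pętlami/47/Rozwiązania/main.py | Zadanie_47
-- ===== SOURCE A (Python) =====
-- def Zadanie_47(S):
--     for X in range(1, S + 1):
--         suma = 0
--         kopia = X
--         while kopia > 0:
--             suma += kopia
--             kopia //= 10
--         if suma == S:
--             return X
--     return -1
-- ===== SOURCE B (Python) =====
-- def Zadanie_47(S):
--     def f(x):
--         s = 0
--         while x > 0:
--             s += x
--             x //= 10
--         return s
--     lo, hi = 1, S
--     while lo <= hi:
--         mid = (lo + hi) // 2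
--         v = f(mid)
--         if v == S:
--             return mid
--         elif v < S:
--             lo = mid + 1
--         else:
--             hi = mid - 1
--     return -1
-- ===== Notes on version B (the rewrite author's own statement) =====
-- stated objective: faster
-- what changed: Replaced A's linear scan of all X in [1,S] by a binary search on X, valid because the digit-shift sum f(X)=X+X//10+X//100+... is strictly increasing.
import Mathlib
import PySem

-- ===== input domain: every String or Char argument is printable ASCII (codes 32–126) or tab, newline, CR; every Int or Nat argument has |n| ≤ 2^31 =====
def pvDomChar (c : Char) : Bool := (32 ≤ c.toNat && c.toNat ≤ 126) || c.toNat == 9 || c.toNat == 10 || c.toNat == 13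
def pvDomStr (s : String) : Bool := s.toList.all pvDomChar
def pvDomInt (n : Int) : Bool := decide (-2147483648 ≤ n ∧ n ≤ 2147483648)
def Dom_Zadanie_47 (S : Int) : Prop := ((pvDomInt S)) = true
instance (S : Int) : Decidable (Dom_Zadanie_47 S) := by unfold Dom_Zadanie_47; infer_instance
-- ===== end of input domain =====

-- B replaces A's linear scan of X = 1..S by a binary search on X (the digit-shift
-- sum f(X) = X + X//10 + X//100 + ... is strictly increasing); objective: faster.

-- ===== PORT A =====
-- inner while loop of A (suma = 0; while kopia > 0: suma += kopia; kopia //= 10);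
-- B's Python has the identical helper f, so both ports share this transliteration.
def shiftSum (k : Int) : Int :=
  if 0 < k then k + shiftSum (PySem.Int.floordiv k 10) else 0
termination_by k.toNat
decreasing_by
  have h10 : PySem.Int.floordiv k 10 = k / 10 := PySem.Int.floordiv_eq_ediv_of_pos (by norm_num)
  omega

-- for X in range(1, S+1): … early return; else -1
def Zadanie47Loop (S X : Int) : Int :=
  if X ≤ S then
    if shiftSum X = S then X else Zadanie47Loop S (X + 1)
  else -1
termination_by (S + 1 - X).toNat
decreasing_by omega

def Zadanie_47 (S : Int) : Int := Zadanie47Loop S 1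

-- ===== PORT B =====
-- while lo <= hi: mid = (lo+hi)//2; v = f(mid); …
def Zadanie47Bs (S lo hi : Int) : Int :=
  if h : lo ≤ hi then
    let mid := PySem.Int.floordiv (lo + hi) 2
    if shiftSum mid = S then mid
    else if shiftSum mid < S then Zadanie47Bs S (mid + 1) hi
    else Zadanie47Bs S lo (mid - 1)
  else -1
termination_by (hi + 1 - lo).toNat
decreasing_by
  · obtain ⟨hm1, hm2⟩ := PySem.Int.floordiv_two_mid_bounds h
    omega
  · obtain ⟨hm1, hm2⟩ := PySem.Int.floordiv_two_mid_bounds h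
    omega

def Zadanie_47_alt (S : Int) : Int := Zadanie47Bs S 1 S

-- ===== PRECONDITION & SPEC =====
def Spec_Zadanie_47 (S : Int) (out : Int) : Prop := out = Zadanie_47_alt S
instance (S : Int) (out : Int) : Decidable (Spec_Zadanie_47 S out) := by unfold Spec_Zadanie_47; infer_instance

-- ===== CLAIM (what is proved, stated in full; the proofs are below) =====
def Claim_equal_Zadanie_47 : Prop := ∀ (S : Int), Dom_Zadanie_47 S → Spec_Zadanie_47 S (Zadanie_47 S)

-- ===== LEMMAS AND PROOFS =====

theorem shiftSum_pos_eq {k : Int} (h : 0 < k) :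
    shiftSum k = k + shiftSum (PySem.Int.floordiv k 10) := by
  rw [shiftSum]; simp [h]

theorem shiftSum_nonpos_eq {k : Int} (h : ¬ 0 < k) : shiftSum k = 0 := by
  rw [shiftSum]; simp [h]

theorem shiftSum_nonneg (k : Int) : 0 ≤ shiftSum k := by
  by_cases h : 0 < k
  · rw [shiftSum_pos_eq h]
    have h10 : PySem.Int.floordiv k 10 = k / 10 := PySem.Int.floordiv_eq_ediv_of_pos (by norm_num)
    have := shiftSum_nonneg (PySem.Int.floordiv k 10)
    omega
  · rw [shiftSum_nonpos_eq h]
termination_by k.toNat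
decreasing_by
  have h10 : PySem.Int.floordiv k 10 = k / 10 := PySem.Int.floordiv_eq_ediv_of_pos (by norm_num)
  omega

theorem shiftSum_ge (k : Int) (hk : 0 ≤ k) : k ≤ shiftSum k := by
  by_cases h : 0 < k
  · rw [shiftSum_pos_eq h]
    have := shiftSum_nonneg (PySem.Int.floordiv k 10)
    omega
  · rw [shiftSum_nonpos_eq h]; omega

theorem shiftSum_mono (b a : Int) (ha : 0 ≤ a) (hab : a ≤ b) : shiftSum a ≤ shiftSum b := by
  by_cases hb : 0 < b
  · by_cases ha' : 0 < a
    · rw [shiftSum_pos_eq ha', shiftSum_pos_eq hb]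
      have ha10 : PySem.Int.floordiv a 10 = a / 10 := PySem.Int.floordiv_eq_ediv_of_pos (by norm_num)
      have hb10 : PySem.Int.floordiv b 10 = b / 10 := PySem.Int.floordiv_eq_ediv_of_pos (by norm_num)
      have hrec := shiftSum_mono (PySem.Int.floordiv b 10) (PySem.Int.floordiv a 10)
        (by omega) (by omega)
      omega
    · rw [shiftSum_nonpos_eq ha']
      exact shiftSum_nonneg b
  · have ha'' : ¬ 0 < a := by omega
    rw [shiftSum_nonpos_eq ha'', shiftSum_nonpos_eq hb]
termination_by b.toNat
decreasing_by
  have hb10 : PySem.Int.floordiv b 10 = b / 10 := PySem.Int.floordiv_eq_ediv_of_pos (by norm_num)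
  omega

theorem shiftSum_strictMono (a b : Int) (ha : 0 ≤ a) (hab : a < b) :
    shiftSum a < shiftSum b := by
  have hb : 0 < b := by omega
  rw [shiftSum_pos_eq hb]
  by_cases ha' : 0 < a
  · rw [shiftSum_pos_eq ha']
    have ha10 : PySem.Int.floordiv a 10 = a / 10 := PySem.Int.floordiv_eq_ediv_of_pos (by norm_num)
    have hb10 : PySem.Int.floordiv b 10 = b / 10 := PySem.Int.floordiv_eq_ediv_of_pos (by norm_num)
    have := shiftSum_mono (PySem.Int.floordiv b 10) (PySem.Int.floordiv a 10) (by omega) (by omega)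
    omega
  · rw [shiftSum_nonpos_eq ha']
    have := shiftSum_nonneg (PySem.Int.floordiv b 10)
    omega

theorem shiftSum_inj (x y : Int) (hx : 1 ≤ x) (hy : 1 ≤ y)
    (h : shiftSum x = shiftSum y) : x = y := by
  rcases lt_trichotomy x y with h' | h' | h'
  · have := shiftSum_strictMono x y (by omega) h'; omega
  · exact h'
  · have := shiftSum_strictMono y x (by omega) h'; omega

theorem loop_le {S X : Int} (h : X ≤ S) :
    Zadanie47Loop S X = if shiftSum X = S then X else Zadanie47Loop S (X + 1) := by
  rw [Zadanie47Loop]; simp [h]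

theorem loop_gt {S X : Int} (h : ¬ X ≤ S) : Zadanie47Loop S X = -1 := by
  rw [Zadanie47Loop]; simp [h]

theorem loop_finds (S x0 X : Int) (hx0 : 1 ≤ x0) (hs : shiftSum x0 = S)
    (hX : 1 ≤ X) (hXx0 : X ≤ x0) : Zadanie47Loop S X = x0 := by
  have hxS : x0 ≤ S := by have := shiftSum_ge x0 (by omega); omega
  rw [loop_le (by omega)]
  by_cases he : shiftSum X = S
  · rw [if_pos he]
    exact shiftSum_inj X x0 hX hx0 (by omega)
  · have hlt : X < x0 := by
      rcases eq_or_lt_of_le hXx0 with h' | h'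
      · exact absurd (h' ▸ hs) he
      · exact h'
    rw [if_neg he]
    exact loop_finds S x0 (X + 1) hx0 hs (by omega) (by omega)
termination_by (x0 - X).toNat
decreasing_by omega

theorem loop_none (S X : Int) (hX : 1 ≤ X)
    (hns : ∀ y, 1 ≤ y → shiftSum y ≠ S) : Zadanie47Loop S X = -1 := by
  by_cases h : X ≤ S
  · rw [loop_le h, if_neg (hns X hX)]
    exact loop_none S (X + 1) (by omega) hns
  · exact loop_gt h
termination_by (S + 1 - X).toNat
decreasing_by omega

theorem bs_le {S lo hi : Int} (h : lo ≤ hi) :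
    Zadanie47Bs S lo hi =
      if shiftSum (PySem.Int.floordiv (lo + hi) 2) = S then PySem.Int.floordiv (lo + hi) 2
      else if shiftSum (PySem.Int.floordiv (lo + hi) 2) < S then
        Zadanie47Bs S (PySem.Int.floordiv (lo + hi) 2 + 1) hi
      else Zadanie47Bs S lo (PySem.Int.floordiv (lo + hi) 2 - 1) := by
  rw [Zadanie47Bs]; simp [h]

theorem bs_gt {S lo hi : Int} (h : ¬ lo ≤ hi) : Zadanie47Bs S lo hi = -1 := by
  rw [Zadanie47Bs]; simp [h]

theorem bs_finds (S x0 lo hi : Int) (hx0 : 1 ≤ x0) (hs : shiftSum x0 = S)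
    (hlo : 1 ≤ lo) (h1 : lo ≤ x0) (h2 : x0 ≤ hi) : Zadanie47Bs S lo hi = x0 := by
  have hlh : lo ≤ hi := by omega
  obtain ⟨hm1, hm2⟩ := PySem.Int.floordiv_two_mid_bounds hlh
  rw [bs_le hlh]
  by_cases he : shiftSum (PySem.Int.floordiv (lo + hi) 2) = S
  · rw [if_pos he]
    exact shiftSum_inj _ x0 (by omega) hx0 (by omega)
  · rw [if_neg he]
    by_cases hl : shiftSum (PySem.Int.floordiv (lo + hi) 2) < S
    · rw [if_pos hl]
      have hmx : PySem.Int.floordiv (lo + hi) 2 < x0 := by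
        by_contra hc
        have := shiftSum_mono (PySem.Int.floordiv (lo + hi) 2) x0 (by omega) (by omega)
        omega
      exact bs_finds S x0 (PySem.Int.floordiv (lo + hi) 2 + 1) hi hx0 hs (by omega) (by omega) h2
    · rw [if_neg hl]
      have hmx : x0 < PySem.Int.floordiv (lo + hi) 2 := by
        by_contra hc
        have := shiftSum_mono x0 (PySem.Int.floordiv (lo + hi) 2) (by omega) (by omega)
        omega
      exact bs_finds S x0 lo (PySem.Int.floordiv (lo + hi) 2 - 1) hx0 hs hlo h1 (by omega)
termination_by (hi + 1 - lo).toNat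
decreasing_by
  · omega
  · omega

theorem bs_none (S lo hi : Int) (hlo : 1 ≤ lo)
    (hns : ∀ y, 1 ≤ y → shiftSum y ≠ S) : Zadanie47Bs S lo hi = -1 := by
  by_cases hlh : lo ≤ hi
  · obtain ⟨hm1, hm2⟩ := PySem.Int.floordiv_two_mid_bounds hlh
    rw [bs_le hlh, if_neg (hns _ (by omega))]
    split_ifs
    · exact bs_none S (PySem.Int.floordiv (lo + hi) 2 + 1) hi (by omega) hns
    · exact bs_none S lo (PySem.Int.floordiv (lo + hi) 2 - 1) hlo hns
  · exact bs_gt hlh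
termination_by (hi + 1 - lo).toNat
decreasing_by
  · omega
  · omega

-- ===== VERDICT (by name: the statement is the Claim_ definition above) =====
theorem Zadanie_47_spec : Claim_equal_Zadanie_47 := by
  intro S _
  unfold Spec_Zadanie_47 Zadanie_47 Zadanie_47_alt
  by_cases h : ∃ x, 1 ≤ x ∧ shiftSum x = S
  · obtain ⟨x0, hx0, hs⟩ := h
    have hxS : x0 ≤ S := by have := shiftSum_ge x0 (by omega); omega
    rw [loop_finds S x0 1 hx0 hs (by omega) hx0,
        bs_finds S x0 1 S hx0 hs (by omega) hx0 hxS]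
  · push Not at h
    have hns : ∀ y, 1 ≤ y → shiftSum y ≠ S := fun y hy => h y hy
    rw [loop_none S 1 (by omega) hns, bs_none S 1 S (by omega) hns]
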